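-- pv_equiv track=rewrite | github.com/shubhamsahu1611/Mind-Game-Simulator | ques_1.py | calc_prob
-- ===== SOURCE A (Python) =====
-- M=1000000007
--
-- def mod_add(a, b):
--     a=(a%M+M)%M
--     b=(b%M+M)%M
--     return (a+b)%M
--
-- def mod_multiply(a, b):
--     a=(a%M+M)%M
--     b=(b%M+M)%M
--     return (a*b)%M
--
-- def mod_divide(a, b):
--     a=(a%M+M)%M
--     b=(b%M+M)%M
--     return mod_multiply(a, pow(b, M-2, M))
--
-- def solve(wins_by_Alice , wins_by_Bob , total , Alice_need ,dp):
--     if wins_by_Alice>Alice_need: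
--         return 0
--     if wins_by_Alice+wins_by_Bob == total:
--         if wins_by_Alice == Alice_need:
--             return 1
--         else:
--             return 0
--
--     if dp[wins_by_Alice][wins_by_Bob]!=-1:
--         return dp[wins_by_Alice][wins_by_Bob]
--     ans=0
--     match=mod_add(wins_by_Alice, wins_by_Bob) # total match played till now
--
--     #case-1: alice wins the match
--     ans=mod_add(ans , mod_multiply(mod_divide(wins_by_Bob , match),solve(wins_by_Alice+1, wins_by_Bob , total , Alice_need ,dp)))
--
--     #case-2: bob wins the match
--     ans=mod_add(ans , mod_multiply(mod_divide(wins_by_Alice , match),solve(wins_by_Alice, wins_by_Bob+1 , total , Alice_need ,dp)))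
--
--     dp[wins_by_Alice][wins_by_Bob]=ans
--     return ans
--
-- def calc_prob(alice_wins, bob_wins):
--     """
--     Returns:
--         The probability of Alice winning alice_wins times and Bob winning bob_wins times will be of the form p/q,
--         where p and q are positive integers,
--         return p.q^(-1) mod 1000000007.
--     """
--     dp=[]
--     total=mod_add(alice_wins, bob_wins)
--     for x in range(total+1):
--         row=[]
--         for y in range(total+1):
--             row.append(-1)
--         dp.append(row)
--
--
--     return solve(1, 1,total, alice_wins , dp)
-- ===== SOURCE B (Python) =====
-- M = 1000000007
--
-- def calc_prob(alice_wins, bob_wins):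
--     # Backward sweep over diagonals of constant match count: O(n) memory, no
--     # recursion, no memo table, one modular inverse per diagonal.  The match
--     # total is reduced mod M exactly as A's mod_add reduces it.
--     if alice_wins < 1:
--         return 0
--     total = (alice_wins + bob_wins) % M
--     # vals[wa-1] = probability of the target outcome from state (wa, s-wa); start at s = total
--     vals = [1 if wa == alice_wins else 0 for wa in range(1, total)]
--     for s in range(total - 1, 1, -1):
--         inv_s = pow(s, M - 2, M)
--         vals = [((s - wa) * vals[wa] + wa * vals[wa - 1]) * inv_s % M
--                 for wa in range(1, s)]
--     return vals[0]
-- ===== Notes on version B (the rewrite author's own statement) =====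
-- stated objective: faster
-- what changed: Replaces the memoized top-down recursion over an O(n^2) table by an iterative backward sweep over diagonals of constant match count that keeps only one O(n) row and computes a single modular inverse per diagonal instead of two modular exponentiations per state.
import Mathlib
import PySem

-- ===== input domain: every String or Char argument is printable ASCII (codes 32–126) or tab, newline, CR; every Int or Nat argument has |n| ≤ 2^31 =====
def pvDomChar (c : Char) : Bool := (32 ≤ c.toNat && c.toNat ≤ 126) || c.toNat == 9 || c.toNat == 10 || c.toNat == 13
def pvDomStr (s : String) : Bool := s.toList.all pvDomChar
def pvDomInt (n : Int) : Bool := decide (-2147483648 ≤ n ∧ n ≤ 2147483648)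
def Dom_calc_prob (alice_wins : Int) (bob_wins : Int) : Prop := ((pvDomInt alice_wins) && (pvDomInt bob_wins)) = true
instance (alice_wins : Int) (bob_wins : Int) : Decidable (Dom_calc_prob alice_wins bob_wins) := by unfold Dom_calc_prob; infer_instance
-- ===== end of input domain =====

-- B replaces A's memoized top-down recursion over an O(n^2) table by an iterative
-- backward sweep over diagonals of constant match count, keeping one O(n) row and
-- one modular inverse per diagonal (objective: faster).

-- ===== PORT A =====

def pvM : Int := 1000000007

-- hand-written port of Python's three-argument pow(b, e, m) by binary exponentiation:
-- exact for b ≥ 0 and m > 0, the only way both programs call it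
def pvPowMod (b : Int) (e : Nat) (m : Int) : Int :=
  if h : e = 0 then 1 % m
  else
    let half := pvPowMod b (e / 2) m
    if e % 2 = 0 then half * half % m
    else half * half % m * (b % m) % m
termination_by e
decreasing_by omega

def mod_add (a b : Int) : Int :=
  let a' := PySem.Int.mod (PySem.Int.mod a pvM + pvM) pvM
  let b' := PySem.Int.mod (PySem.Int.mod b pvM + pvM) pvM
  PySem.Int.mod (a' + b') pvM

def mod_multiply (a b : Int) : Int :=
  let a' := PySem.Int.mod (PySem.Int.mod a pvM + pvM) pvM
  let b' := PySem.Int.mod (PySem.Int.mod b pvM + pvM) pvM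
  PySem.Int.mod (a' * b') pvM

def mod_divide (a b : Int) : Int :=
  let a' := PySem.Int.mod (PySem.Int.mod a pvM + pvM) pvM
  let b' := PySem.Int.mod (PySem.Int.mod b pvM + pvM) pvM
  mod_multiply a' (pvPowMod b' (pvM - 2).toNat pvM)

-- Python's recursion needs no fuel; the fuel here is only a totality guard, large
-- enough on every input Pre_ admits (the 'none'/fuel-0 branches are IndexError states).
def solve : Nat → Int → Int → Int → Int → List (List Int) → Int × List (List Int)
  | 0, _, _, _, _, dp => (0, dp)
  | f+1, wins_by_Alice, wins_by_Bob, total, Alice_need, dp =>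
    if wins_by_Alice > Alice_need then (0, dp)
    else if wins_by_Alice + wins_by_Bob = total then
      (if wins_by_Alice = Alice_need then 1 else 0, dp)
    else
      match (PySem.List.pyGet? dp wins_by_Alice).bind (fun row => PySem.List.pyGet? row wins_by_Bob) with
      | none => (0, dp)   -- IndexError in Python: excluded by Pre_
      | some v =>
        if v ≠ -1 then (v, dp)
        else
          let m := mod_add wins_by_Alice wins_by_Bob
          let r1 := solve f (wins_by_Alice + 1) wins_by_Bob total Alice_need dp
          let a1 := mod_add 0 (mod_multiply (mod_divide wins_by_Bob m) r1.1)
          let r2 := solve f wins_by_Alice (wins_by_Bob + 1) total Alice_need r1.2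
          let ans := mod_add a1 (mod_multiply (mod_divide wins_by_Alice m) r2.1)
          (ans, PySem.List.pySetD r2.2 wins_by_Alice
                  (PySem.List.pySetD (PySem.List.pyGetD r2.2 wins_by_Alice []) wins_by_Bob ans))

def calc_prob (alice_wins : Int) (bob_wins : Int) : Int :=
  let total := mod_add alice_wins bob_wins
  let dp := (PySem.List.pyRange 0 (total + 1) 1).foldl
    (fun dp _ => dp ++ [(PySem.List.pyRange 0 (total + 1) 1).foldl (fun row _ => row ++ [(-1 : Int)]) []]) []
  (solve (total + 2).toNat 1 1 total alice_wins dp).1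

-- ===== PORT B =====

-- one diagonal of B's sweep: the body of B's `for s in range(total-1, 1, -1)` loop
def pvSweepStep (vals : List Int) (s : Int) : List Int :=
  let inv_s := pvPowMod s (pvM - 2).toNat pvM
  (PySem.List.pyRange 1 s 1).map (fun wa =>
    PySem.Int.mod (((s - wa) * PySem.List.pyGetD vals wa 0
                    + wa * PySem.List.pyGetD vals (wa - 1) 0) * inv_s) pvM)

def calc_prob_alt (alice_wins : Int) (bob_wins : Int) : Int :=
  if alice_wins < 1 then 0
  else
    let total := PySem.Int.mod (alice_wins + bob_wins) pvM
    let vals0 := (PySem.List.pyRange 1 total 1).map (fun wa => if wa = alice_wins then (1 : Int) else 0)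
    let vals := (PySem.List.pyRange (total - 1) 1 (-1)).foldl pvSweepStep vals0
    PySem.List.pyGetD vals 0 0

-- ===== PRECONDITION & SPEC =====
-- Pre_ excludes exactly the inputs on which A raises: alice_wins ≥ 1 with
-- (alice_wins + bob_wins) mod 10^9+7 ≤ 1, where A's (total+1)×(total+1) memo table is
-- too small for the start state of one win each, and solve raises IndexError.
def Pre_calc_prob (alice_wins : Int) (bob_wins : Int) : Prop :=
  1 ≤ alice_wins → 2 ≤ (alice_wins + bob_wins) % 1000000007
instance (alice_wins : Int) (bob_wins : Int) : Decidable (Pre_calc_prob alice_wins bob_wins) := by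
  unfold Pre_calc_prob; infer_instance

def pvWitness_calc_prob : Int × Int := (3, 4)

def Spec_calc_prob (alice_wins : Int) (bob_wins : Int) (out : Int) : Prop := out = calc_prob_alt alice_wins bob_wins
instance (alice_wins : Int) (bob_wins : Int) (out : Int) : Decidable (Spec_calc_prob alice_wins bob_wins out) := by unfold Spec_calc_prob; infer_instance

-- ===== CLAIM (what is proved, stated in full; the proofs are below) =====
def Claim_equal_calc_prob : Prop := ∀ (alice_wins : Int) (bob_wins : Int), Dom_calc_prob alice_wins bob_wins → Pre_calc_prob alice_wins bob_wins → Spec_calc_prob alice_wins bob_wins (calc_prob alice_wins bob_wins)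

-- ===== LEMMAS AND PROOFS =====

-- the common value of both programs: pvG d need wa wb is A's `solve` at a state with
-- d matches left to play, memoization stripped away
def pvG : Nat → Int → Int → Int → Int
  | 0, need, wa, _ => if wa > need then 0 else if wa = need then 1 else 0
  | d+1, need, wa, wb =>
    if wa > need then 0
    else
      let m := mod_add wa wb
      mod_add (mod_add 0 (mod_multiply (mod_divide wb m) (pvG d need (wa + 1) wb)))
              (mod_multiply (mod_divide wa m) (pvG d need wa (wb + 1)))

lemma pvmod_eq (x : Int) : PySem.Int.mod x pvM = x % pvM :=
  PySem.Int.mod_eq_emod_of_pos (by norm_num [pvM])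

lemma mod_add_eq (a b : Int) : mod_add a b = (a + b) % pvM := by
  simp only [mod_add, pvmod_eq]
  simp only [pvM]
  omega

lemma mod_multiply_eq (a b : Int) : mod_multiply a b = (a * b) % pvM := by
  simp only [mod_multiply, pvmod_eq]
  have h1 : (a % pvM + pvM) % pvM = a % pvM := by simp only [pvM]; omega
  have h2 : (b % pvM + pvM) % pvM = b % pvM := by simp only [pvM]; omega
  rw [h1, h2, ← Int.mul_emod]

lemma mod_add_bounds (a b : Int) : 0 ≤ mod_add a b ∧ mod_add a b < pvM := by
  rw [mod_add_eq]; constructor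
  · exact Int.emod_nonneg _ (by norm_num [pvM])
  · exact Int.emod_lt_of_pos _ (by norm_num [pvM])

lemma pvG_zero_of_gt {need wa : Int} (h : need < wa) (d : Nat) (wb : Int) :
    pvG d need wa wb = 0 := by
  cases d <;> simp [pvG, h]

-- dp table shape
def DimsOk (total : Int) (dp : List (List Int)) : Prop :=
  dp.length = (total + 1).toNat ∧ ∀ row ∈ dp, row.length = (total + 1).toNat

-- memo invariant: every stored (≠ -1) entry is the pure value
def InvOk (total need : Int) (dp : List (List Int)) : Prop :=
  ∀ (i j : Nat) (row : List Int) (v : Int), dp[i]? = some row → row[j]? = some v → v ≠ -1 →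
    v = pvG (total - i - j).toNat need i j

lemma solve_sim (total need : Int) :
    ∀ (d : Nat) (f : Nat) (wa wb : Int) (dp : List (List Int)),
    (total - wa - wb).toNat = d → wa + wb ≤ total → 1 ≤ wa → 1 ≤ wb → d < f →
    DimsOk total dp → InvOk total need dp →
    (solve f wa wb total need dp).1 = pvG d need wa wb ∧
      DimsOk total (solve f wa wb total need dp).2 ∧
      InvOk total need (solve f wa wb total need dp).2 := by
  intro d
  induction d with
  | zero =>
    intro f wa wb dp hd hsum hwa hwb hf hdims hinv
    obtain ⟨f', rfl⟩ : ∃ f', f = f' + 1 := ⟨f - 1, by omega⟩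
    have hsum' : wa + wb = total := by omega
    simp only [solve]
    by_cases hgt : wa > need
    · rw [if_pos hgt]
      exact ⟨by simp [pvG, hgt], hdims, hinv⟩
    · rw [if_neg hgt, if_pos hsum']
      refine ⟨?_, hdims, hinv⟩
      simp only [pvG]
      rw [if_neg hgt]
  | succ d ih =>
    intro f wa wb dp hd hsum hwa hwb hf hdims hinv
    obtain ⟨f', rfl⟩ : ∃ f', f = f' + 1 := ⟨f - 1, by omega⟩
    have hlt : wa + wb < total := by omega
    simp only [solve]
    by_cases hgt : wa > need
    · rw [if_pos hgt]
      exact ⟨by simp [pvG, hgt], hdims, hinv⟩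
    rw [if_neg hgt, if_neg (by omega)]
    obtain ⟨hlen, hrows⟩ := hdims
    have hwa_lt : wa.toNat < dp.length := by omega
    obtain ⟨row, hrow⟩ : ∃ row, dp[wa.toNat]? = some row := ⟨_, List.getElem?_eq_getElem hwa_lt⟩
    have hrowlen : row.length = (total + 1).toNat := hrows _ (List.mem_of_getElem? hrow)
    have hwb_lt : wb.toNat < row.length := by omega
    obtain ⟨v, hv⟩ : ∃ v, row[wb.toNat]? = some v := ⟨_, List.getElem?_eq_getElem hwb_lt⟩
    have hbind : (PySem.List.pyGet? dp wa).bind (fun row => PySem.List.pyGet? row wb) = some v := by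
      rw [PySem.List.pyGet?_of_nonneg dp (by omega), hrow, Option.bind_some,
          PySem.List.pyGet?_of_nonneg row (by omega), hv]
    rw [hbind]
    dsimp only
    by_cases hne : v = -1
    · -- memo miss: recompute, store
      rw [if_neg (by simp [hne])]
      have ih1 := ih f' (wa + 1) wb dp (by omega) (by omega) (by omega) hwb (by omega)
        ⟨hlen, hrows⟩ hinv
      obtain ⟨h1v, h1dims, h1inv⟩ := ih1
      have ih2 := ih f' wa (wb + 1) (solve f' (wa + 1) wb total need dp).2 (by omega)
        (by omega) hwa (by omega) (by omega) h1dims h1inv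
      obtain ⟨h2v, h2dims, h2inv⟩ := ih2
      set r1 := solve f' (wa + 1) wb total need dp with hr1
      set r2 := solve f' wa (wb + 1) total need r1.2 with hr2
      set ans := mod_add (mod_add 0 (mod_multiply (mod_divide wb (mod_add wa wb)) r1.1))
        (mod_multiply (mod_divide wa (mod_add wa wb)) r2.1) with hans
      have hansG : ans = pvG (d + 1) need wa wb := by
        simp only [pvG]
        rw [if_neg hgt, hans, h1v, h2v]
      obtain ⟨h2len, h2rows⟩ := h2dims
      have hwa_lt2 : wa.toNat < r2.2.length := by omega
      have hrow2 : PySem.List.pyGetD r2.2 wa [] = r2.2[wa.toNat] :=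
        PySem.List.pyGetD_eq_getElem _ _ (by omega) (by omega)
      have hrow2len : r2.2[wa.toNat].length = (total + 1).toNat :=
        h2rows _ (List.getElem_mem _)
      refine ⟨hansG, ?_, ?_⟩
      · -- DimsOk of the written table
        rw [PySem.List.pySetD_of_nonneg _ _ (by omega)]
        constructor
        · simp only [List.length_set]; omega
        · intro row' hrow'
          rcases List.mem_or_eq_of_mem_set hrow' with h | h
          · exact h2rows _ h
          · rw [h, PySem.List.pySetD_of_nonneg _ _ (by omega), List.length_set, hrow2, hrow2len]
      · -- InvOk of the written table
        rw [PySem.List.pySetD_of_nonneg _ _ (by omega), PySem.List.pySetD_of_nonneg _ _ (by omega),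
            hrow2]
        intro i j row' v' h1 h2 hne'
        rw [List.getElem?_set] at h1
        by_cases hi : wa.toNat = i
        · rw [if_pos hi, if_pos (by omega)] at h1
          obtain rfl : row' = r2.2[wa.toNat].set wb.toNat ans := by
            injection h1 with h; exact h.symm
          rw [List.getElem?_set] at h2
          by_cases hj : wb.toNat = j
          · rw [if_pos hj, if_pos (by omega)] at h2
            obtain rfl : v' = ans := by injection h2 with h; exact h.symm
            rw [hansG]
            have hci : ((i : Int)) = wa := by omega
            have hcj : ((j : Int)) = wb := by omega
            rw [hci, hcj, show (total - wa - wb).toNat = d + 1 from hd]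
          · rw [if_neg hj] at h2
            have := h2inv wa.toNat j r2.2[wa.toNat] v'
              (List.getElem?_eq_getElem hwa_lt2) h2 hne'
            rw [← hi] at *
            exact this
        · rw [if_neg hi] at h1
          exact h2inv i j row' v' h1 h2 hne'
    · -- memo hit
      rw [if_pos (by simp [hne])]
      refine ⟨?_, ⟨hlen, hrows⟩, hinv⟩
      have := hinv wa.toNat wb.toNat row v hrow hv hne
      rw [Int.toNat_of_nonneg (by omega), Int.toNat_of_nonneg (by omega)] at this
      rw [this, hd]

-- ===== B-side: the diagonal sweep computes pvG =====

def pvDiag (need s : Int) (d : Nat) : List Int :=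
  (PySem.List.pyRange 1 s 1).map (fun wa => pvG d need wa (s - wa))

-- per-entry bridge: A's mod-expression chain equals B's single-inverse form
lemma pvBridge (s wa X Y : Int) (h1 : 1 ≤ wa) (h2 : wa < s) (hs : s < pvM) :
    mod_add (mod_add 0 (mod_multiply (mod_divide (s - wa) (mod_add wa (s - wa))) X))
            (mod_multiply (mod_divide wa (mod_add wa (s - wa))) Y)
      = ((s - wa) * X + wa * Y) * pvPowMod s (pvM - 2).toNat pvM % pvM := by
  set P := pvPowMod s (pvM - 2).toNat pvM with hP
  have hm : mod_add wa (s - wa) = s := by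
    rw [mod_add_eq, show wa + (s - wa) = s from by ring, Int.emod_eq_of_lt (by omega) hs]
  rw [hm]
  have hdiv : ∀ x : Int, 0 ≤ x → x < pvM → mod_divide x s = x * P % pvM := by
    intro x h0 h1
    simp only [mod_divide, pvmod_eq]
    have hx : (x % pvM + pvM) % pvM = x := by simp only [pvM] at *; omega
    have hs' : (s % pvM + pvM) % pvM = s := by simp only [pvM] at *; omega
    rw [hx, hs', mod_multiply_eq, ← hP]
  rw [hdiv (s - wa) (by omega) (by omega), hdiv wa (by omega) (by omega)]
  rw [mod_multiply_eq, mod_multiply_eq, mod_add_eq, mod_add_eq]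
  conv_rhs => rw [show ((s - wa) * X + wa * Y) * P = (s - wa) * P * X + wa * P * Y from by ring]
  conv_lhs => rw [zero_add, Int.emod_emod_of_dvd _ dvd_rfl]
  rw [Int.mul_emod ((s - wa) * P % pvM) X, Int.emod_emod_of_dvd _ dvd_rfl, ← Int.mul_emod]
  rw [Int.mul_emod ((wa * P % pvM)) Y, Int.emod_emod_of_dvd _ dvd_rfl, ← Int.mul_emod]
  rw [← Int.add_emod]

lemma pvStep (total need s : Int) (h2 : 2 ≤ s) (hlt : s < total) (hM : total < pvM) :
    pvSweepStep (pvDiag need (s + 1) ((total - (s + 1)).toNat)) s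
      = pvDiag need s ((total - s).toNat) := by
  have hsM : s < pvM := by omega
  simp only [pvSweepStep, pvDiag]
  apply List.map_congr_left
  intro wa hwa
  rw [PySem.List.mem_pyRange_one] at hwa
  obtain ⟨hwa1, hwas⟩ := hwa
  have hd : (total - (s + 1)).toNat + 1 = (total - s).toNat := by omega
  set d := (total - (s + 1)).toNat with hdd
  have hlen : ((PySem.List.pyRange 1 (s + 1) 1).map
      (fun wa => pvG d need wa (s + 1 - wa))).length = s.toNat := by
    simp only [List.length_map, PySem.List.length_pyRange_one]
    omega
  have hget : ∀ (i : Int), 0 ≤ i → i < s →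
      PySem.List.pyGetD ((PySem.List.pyRange 1 (s + 1) 1).map
        (fun wa => pvG d need wa (s + 1 - wa))) i 0 = pvG d need (i + 1) (s - i) := by
    intro i h0 hi
    rw [PySem.List.pyGetD_eq_getElem _ _ h0 (by rw [hlen]; omega)]
    rw [List.getElem_map, PySem.List.getElem_pyRange_one]
    have e2 : s + 1 - (1 + (i.toNat : Int)) = s - i := by omega
    have e1 : (1 : Int) + (i.toNat : Int) = i + 1 := by omega
    rw [e2, e1]
  rw [hget wa (by omega) hwas, hget (wa - 1) (by omega) (by omega)]
  have e1 : wa - 1 + 1 = wa := by ring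
  have e2 : s - (wa - 1) = s - wa + 1 := by ring
  rw [e1, e2, ← hd]
  by_cases hgt : wa > need
  · rw [pvG_zero_of_gt hgt, pvG_zero_of_gt (by omega), pvG_zero_of_gt (by omega)]
    rw [pvmod_eq]
    norm_num
  · rw [show pvG (d + 1) need wa (s - wa) = mod_add
        (mod_add 0 (mod_multiply (mod_divide (s - wa) (mod_add wa (s - wa))) (pvG d need (wa + 1) (s - wa))))
        (mod_multiply (mod_divide wa (mod_add wa (s - wa))) (pvG d need wa (s - wa + 1)))
      from by simp only [pvG]; rw [if_neg hgt]]
    rw [pvmod_eq]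
    exact (pvBridge s wa _ _ hwa1 hwas hsM).symm

lemma pvChain (total need : Int) (hM : total < pvM) :
    ∀ (k : Nat), 2 + (k : Int) ≤ total →
    (PySem.List.pyRange ((k : Int) + 1) 1 (-1)).foldl pvSweepStep
      (pvDiag need ((k : Int) + 2) ((total - ((k : Int) + 2)).toNat))
      = pvDiag need 2 ((total - 2).toNat) := by
  intro k
  induction k with
  | zero =>
    intro _
    rw [show ((0 : Nat) : Int) + 1 = 1 from by norm_num]
    rw [PySem.List.pyRange_neg_one_eq_nil (by norm_num)]
    norm_num
  | succ k ih =>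
    intro hk
    push_cast
    rw [show ((k : Int) + 1 + 1) = (k : Int) + 2 from by ring]
    rw [PySem.List.pyRange_neg_one_cons (by omega)]
    rw [List.foldl_cons]
    rw [show ((k : Int) + 2 - 1) = (k : Int) + 1 from by ring]
    have hstep := pvStep total need ((k : Int) + 2) (by omega) (by push_cast at hk; omega) hM
    have e3 : (k : Int) + 1 + 2 = (k : Int) + 2 + 1 := by ring
    push_cast at ih ⊢
    rw [e3, hstep]
    exact ih (by push_cast at hk ⊢; omega)

lemma calc_prob_alt_eq (a b : Int) (ha : 1 ≤ a) (h2 : 2 ≤ (a + b) % pvM) :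
    calc_prob_alt a b = pvG (((a + b) % pvM - 2).toNat) a 1 1 := by
  have hM : (a + b) % pvM < pvM := Int.emod_lt_of_pos _ (by norm_num [pvM])
  simp only [calc_prob_alt]
  rw [if_neg (by omega), pvmod_eq]
  set t := (a + b) % pvM with ht
  have hcast : ((t - 2).toNat : Int) = t - 2 := Int.toNat_of_nonneg (by omega)
  have hinit : (PySem.List.pyRange 1 t 1).map (fun wa => if wa = a then (1 : Int) else 0)
      = pvDiag a t 0 := by
    simp only [pvDiag]
    apply List.map_congr_left
    intro wa _
    simp only [pvG]
    by_cases h : wa = a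
    · simp [h]
    · simp [h]
  have hchain := pvChain t a hM ((t - 2).toNat) (by rw [hcast]; omega)
  rw [hcast] at hchain
  rw [show t - 2 + 1 = t - 1 from by ring, show t - 2 + 2 = t from by ring,
      show (t - t).toNat = 0 from by omega] at hchain
  rw [hinit, hchain]
  simp only [pvDiag]
  rw [show (2 : Int) = 1 + 1 from by norm_num, PySem.List.pyRange_one_singleton]
  simp only [List.map_cons, List.map_nil, PySem.List.pyGetD_zero_cons]
  norm_num

lemma calc_prob_eq (a b : Int) (_ha : 1 ≤ a) (h2 : 2 ≤ (a + b) % pvM) :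
    calc_prob a b = pvG (((a + b) % pvM - 2).toNat) a 1 1 := by
  have hM : (a + b) % pvM < pvM := Int.emod_lt_of_pos _ (by norm_num [pvM])
  have htot : mod_add a b = (a + b) % pvM := mod_add_eq a b
  simp only [calc_prob, htot]
  set t := (a + b) % pvM with ht
  rw [PySem.List.foldl_append_singleton_eq_map
    (f := fun _ => (PySem.List.pyRange 0 (t + 1) 1).foldl (fun row _ => row ++ [(-1 : Int)]) [])]
  rw [PySem.List.foldl_append_singleton_eq_map (f := fun _ => (-1 : Int))]
  simp only [List.nil_append]
  set dp0 := (PySem.List.pyRange 0 (t + 1) 1).map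
    (fun _ => (PySem.List.pyRange 0 (t + 1) 1).map (fun _ => (-1 : Int))) with hdp0
  have hdims : DimsOk t dp0 := by
    constructor
    · simp only [hdp0, List.length_map, PySem.List.length_pyRange_one]
      omega
    · intro row hrow
      rw [hdp0, List.mem_map] at hrow
      obtain ⟨_, _, rfl⟩ := hrow
      simp only [List.length_map, PySem.List.length_pyRange_one]
      omega
  have hinv : InvOk t a dp0 := by
    intro i j row v h1 h2 hne
    exfalso
    have hrm : row ∈ dp0 := List.mem_of_getElem? h1
    rw [hdp0, List.mem_map] at hrm
    obtain ⟨_, _, rfl⟩ := hrm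
    have hvm := List.mem_of_getElem? h2
    rw [List.mem_map] at hvm
    obtain ⟨_, _, rfl⟩ := hvm
    exact hne rfl
  have hsim := solve_sim t a ((t - 2).toNat) ((t + 2).toNat) 1 1 dp0
    (by rw [show t - 1 - 1 = t - 2 from by ring]) (by omega) le_rfl le_rfl
    (by omega) hdims hinv
  exact hsim.1

-- ===== VERDICT (by name: the statement is the Claim_ definition above) =====
theorem calc_prob_spec : Claim_equal_calc_prob := by
  intro a b hdom hpre
  unfold Spec_calc_prob
  by_cases ha : 1 ≤ a
  · have h2 : 2 ≤ (a + b) % pvM := by simpa [pvM] using hpre ha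
    rw [calc_prob_eq a b ha h2, calc_prob_alt_eq a b ha h2]
  · -- alice_wins < 1: A returns 0 at once (1 > Alice_need), B by its guard
    have : calc_prob a b = 0 := by
      show (solve (mod_add a b + 2).toNat 1 1 (mod_add a b) a _).1 = 0
      have hf : 1 ≤ (mod_add a b + 2).toNat := by
        have := mod_add_bounds a b; omega
      obtain ⟨f, hf⟩ : ∃ f, (mod_add a b + 2).toNat = f + 1 := ⟨_, (Nat.succ_pred_eq_of_pos hf).symm⟩
      rw [hf]
      simp only [solve]
      rw [if_pos (by omega)]
    rw [this]
    simp only [calc_prob_alt]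
    rw [if_pos (by omega)]
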